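-- pv_equiv track=rewrite | github.com/stochastic-yukke/python-sierpinski-gasket | py-files/kummer_mod5.py | binom_mod5
-- ===== SOURCE A (Python) =====
-- def binom_mod5(n, k):
--     count = 0
--     while n > 0 or k > 0:
--         n_i = n % 5
--         k_i = k % 5
--         if k_i > n_i:
--             count += 1
--         n //= 5
--         k //= 5
--     return count
-- ===== SOURCE B (Python) =====
-- def binom_mod5(n, k):
--     # closed-form digit access: digit i of x in base 5 is (x // 5**i) % 5 (valid for negatives too)
--     m = n if n > k else k
--     L = 0
--     while 5 ** L <= m:
--         L += 1
--     return sum(1 for i in range(L) if (k // 5 ** i) % 5 > (n // 5 ** i) % 5)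
-- ===== Notes on version B (the rewrite author's own statement) =====
-- stated objective: alternative
-- what changed: B replaces A's destructive interleaved while-loop (repeatedly dividing both arguments by 5) with a closed-form formulation: it first computes the needed digit count L, then counts positions i < L where (k // 5**i) % 5 > (n // 5**i) % 5, never mutating n or k.
import Mathlib
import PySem

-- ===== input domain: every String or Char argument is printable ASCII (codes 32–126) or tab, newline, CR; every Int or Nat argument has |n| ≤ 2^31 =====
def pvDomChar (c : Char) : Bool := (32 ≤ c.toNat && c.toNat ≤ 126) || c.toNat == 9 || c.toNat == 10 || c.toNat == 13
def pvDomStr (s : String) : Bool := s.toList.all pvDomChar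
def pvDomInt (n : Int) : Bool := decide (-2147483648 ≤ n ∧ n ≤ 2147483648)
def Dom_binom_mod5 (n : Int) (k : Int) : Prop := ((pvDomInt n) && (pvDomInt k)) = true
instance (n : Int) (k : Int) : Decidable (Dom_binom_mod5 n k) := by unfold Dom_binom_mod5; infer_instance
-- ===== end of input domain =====

-- B replaces A's destructive interleaved while-loop with a closed-form count over digit
-- positions ((x // 5^i) % 5); objective: alternative (same digit count, no mutation of n/k).


-- ===== PORT A =====
-- literal port of A's while-loop: state (n, k, count), loop while n > 0 or k > 0
def binomA_loop (n : Int) (k : Int) (count : Int) : Int :=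
  if n > 0 ∨ k > 0 then
    binomA_loop (PySem.Int.floordiv n 5) (PySem.Int.floordiv k 5)
      (count + if PySem.Int.mod n 5 < PySem.Int.mod k 5 then 1 else 0)
  else count
termination_by n.toNat + k.toNat
decreasing_by
  rw [PySem.Int.floordiv_eq_ediv_of_pos (by norm_num), PySem.Int.floordiv_eq_ediv_of_pos (by norm_num)]
  omega

def binom_mod5 (n : Int) (k : Int) : Int := binomA_loop n k 0

-- ===== PORT B =====
-- B's first loop: while 5 ** L <= m: L += 1
def lenB (m : Int) (L : Nat) : Nat :=
  if (5 : Int) ^ L ≤ m then lenB m (L + 1) else L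
termination_by (m + 1 - 5 ^ L).toNat
decreasing_by
  have h1 : (1 : Int) ≤ 5 ^ L := one_le_pow₀ (by norm_num)
  rw [pow_succ]
  omega

def binom_mod5_alt (n : Int) (k : Int) : Int :=
  let m := if n > k then n else k
  let L := lenB m 0
  ((List.range L).countP (fun i =>
      decide (PySem.Int.mod (PySem.Int.floordiv n (5 ^ i)) 5
            < PySem.Int.mod (PySem.Int.floordiv k (5 ^ i)) 5)) : Nat)

-- ===== PRECONDITION & SPEC =====
def Spec_binom_mod5 (n : Int) (k : Int) (out : Int) : Prop := out = binom_mod5_alt n k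
instance (n : Int) (k : Int) (out : Int) : Decidable (Spec_binom_mod5 n k out) := by unfold Spec_binom_mod5; infer_instance

-- ===== CLAIM (what is proved, stated in full; the proofs are below) =====
def Claim_equal_binom_mod5 : Prop := ∀ (n : Int) (k : Int), Dom_binom_mod5 n k → Spec_binom_mod5 n k (binom_mod5 n k)

-- ===== LEMMAS AND PROOFS =====

-- floor division by positive powers composes
theorem fdiv_fdiv_pow (x : Int) (i : Nat) :
    PySem.Int.floordiv (PySem.Int.floordiv x 5) (5 ^ i) = PySem.Int.floordiv x (5 ^ (i + 1)) := by
  have h5 : (0 : Int) < 5 := by norm_num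
  have hp : (0 : Int) < 5 ^ i := pow_pos h5 i
  have hp1 : (0 : Int) < 5 ^ (i + 1) := pow_pos h5 (i + 1)
  rw [eq_comm, PySem.Int.floordiv_eq_iff_of_pos hp1]
  set q := PySem.Int.floordiv (PySem.Int.floordiv x 5) (5 ^ i) with hq
  have h1 : q * 5 ^ i ≤ PySem.Int.floordiv x 5 ∧ PySem.Int.floordiv x 5 < (q + 1) * 5 ^ i :=
    (PySem.Int.floordiv_eq_iff_of_pos hp).mp hq.symm
  have h2 : q * 5 ^ i * 5 ≤ x := (PySem.Int.le_floordiv_iff_mul_le h5).mp h1.1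
  have h3 : x < (q + 1) * 5 ^ i * 5 := (PySem.Int.floordiv_lt_iff_lt_mul h5).mp h1.2
  constructor
  · calc q * 5 ^ (i + 1) = q * 5 ^ i * 5 := by ring
    _ ≤ x := h2
  · calc x < (q + 1) * 5 ^ i * 5 := h3
    _ = (q + 1) * 5 ^ (i + 1) := by ring

-- characterization of lenB m 0
theorem lenB_spec (m : Int) (L : Nat) :
    m < 5 ^ (lenB m L) ∧ (lenB m L = L ∨ 5 ^ (lenB m L - 1) ≤ m) ∧ L ≤ lenB m L := by
  rw [lenB.eq_def]
  split
  · rename_i h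
    obtain ⟨h1, h2, h3⟩ := lenB_spec m (L + 1)
    refine ⟨h1, Or.inr ?_, by omega⟩
    rcases h2 with h2 | h2
    · rw [h2]; simpa using h
    · exact h2
  · rename_i h
    exact ⟨by omega, Or.inl rfl, le_refl L⟩
termination_by (m + 1 - 5 ^ L).toNat
decreasing_by
  have h1 : (1 : Int) ≤ 5 ^ L := one_le_pow₀ (by norm_num)
  rw [pow_succ]
  omega

theorem lenB_unique (m : Int) (a b : Nat)
    (ha1 : m < 5 ^ a) (ha2 : a = 0 ∨ 5 ^ (a - 1) ≤ m)
    (hb1 : m < 5 ^ b) (hb2 : b = 0 ∨ 5 ^ (b - 1) ≤ m) : a = b := by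
  by_contra hne
  rcases Nat.lt_or_ge a b with h | h
  · rcases hb2 with hb2 | hb2
    · omega
    · have : (5 : Int) ^ a ≤ 5 ^ (b - 1) := pow_le_pow_right₀ (by norm_num) (by omega)
      omega
  · have hba : b < a := by omega
    rcases ha2 with ha2 | ha2
    · omega
    · have : (5 : Int) ^ b ≤ 5 ^ (a - 1) := pow_le_pow_right₀ (by norm_num) (by omega)
      omega

theorem lenB_of_nonpos (m : Int) (h : m ≤ 0) : lenB m 0 = 0 := by
  rw [lenB.eq_def]
  simp only [pow_zero]
  split
  · omega
  · rfl

-- for 1 ≤ m, the digit count satisfies the recurrence of A's loop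
theorem lenB_rec (m : Int) (h : 1 ≤ m) :
    lenB m 0 = lenB (PySem.Int.floordiv m 5) 0 + 1 := by
  have h5 : (0 : Int) < 5 := by norm_num
  obtain ⟨h1, h2, _⟩ := lenB_spec m 0
  obtain ⟨h1', h2', _⟩ := lenB_spec (PySem.Int.floordiv m 5) 0
  set L' := lenB (PySem.Int.floordiv m 5) 0 with hL'
  apply lenB_unique m _ _ h1 (by simpa using h2)
  · have := (PySem.Int.floordiv_lt_iff_lt_mul h5).mp h1'
    calc m < 5 ^ L' * 5 := this
    _ = 5 ^ (L' + 1) := (pow_succ 5 L').symm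
  · right
    rcases Nat.eq_zero_or_pos L' with hz | hpos
    · simpa [hz] using h
    · rcases h2' with h2' | h2'
      · omega
      · have := (PySem.Int.le_floordiv_iff_mul_le h5).mp h2'
        have he : (5 : Int) ^ (L' - 1) * 5 = 5 ^ (L' + 1 - 1) := by
          rw [← pow_succ]; congr 1; omega
        omega

-- max commutes with floor division by 5
theorem max_fdiv (n k : Int) :
    (if PySem.Int.floordiv n 5 > PySem.Int.floordiv k 5 then PySem.Int.floordiv n 5
     else PySem.Int.floordiv k 5)
      = PySem.Int.floordiv (if n > k then n else k) 5 := by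
  rw [PySem.Int.floordiv_eq_ediv_of_pos (by norm_num),
      PySem.Int.floordiv_eq_ediv_of_pos (by norm_num)]
  split <;> split <;> rw [PySem.Int.floordiv_eq_ediv_of_pos (by norm_num)] <;> omega

theorem fdiv_one (x : Int) : PySem.Int.floordiv x 1 = x := by
  rw [PySem.Int.floordiv_eq_ediv_of_pos (by norm_num)]; exact Int.ediv_one x

-- the per-position predicate, shifted by one digit
theorem countP_shift (n k : Int) (L : Nat) :
    (List.range (L + 1)).countP (fun i =>
        decide (PySem.Int.mod (PySem.Int.floordiv n (5 ^ i)) 5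
              < PySem.Int.mod (PySem.Int.floordiv k (5 ^ i)) 5))
    = ((if PySem.Int.mod n 5 < PySem.Int.mod k 5 then 1 else 0)
      + (List.range L).countP (fun i =>
        decide (PySem.Int.mod (PySem.Int.floordiv (PySem.Int.floordiv n 5) (5 ^ i)) 5
              < PySem.Int.mod (PySem.Int.floordiv (PySem.Int.floordiv k 5) (5 ^ i)) 5))) := by
  rw [List.range_succ_eq_map, List.countP_cons, List.countP_map]
  have hpred : ∀ i : Nat,
      ((fun i => decide (PySem.Int.mod (PySem.Int.floordiv n (5 ^ i)) 5
              < PySem.Int.mod (PySem.Int.floordiv k (5 ^ i)) 5)) ∘ Nat.succ) i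
      = decide (PySem.Int.mod (PySem.Int.floordiv (PySem.Int.floordiv n 5) (5 ^ i)) 5
              < PySem.Int.mod (PySem.Int.floordiv (PySem.Int.floordiv k 5) (5 ^ i)) 5) := by
    intro i
    simp only [Function.comp_apply, Nat.succ_eq_add_one, fdiv_fdiv_pow]
  rw [List.countP_congr (fun i _ => by rw [hpred i])]
  simp only [pow_zero, fdiv_one, decide_eq_true_eq]
  rw [Nat.add_comm]

-- main loop invariant: A's loop adds exactly B's count to the accumulator
theorem binomA_loop_eq (n k c : Int) : binomA_loop n k c = c + binom_mod5_alt n k := by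
  rw [binomA_loop]
  split
  · rename_i h
    rw [binomA_loop_eq (PySem.Int.floordiv n 5) (PySem.Int.floordiv k 5) _]
    unfold binom_mod5_alt
    simp only []
    rw [max_fdiv n k]
    have hm : (1 : Int) ≤ (if n > k then n else k) := by split <;> omega
    rw [lenB_rec _ hm, countP_shift]
    push_cast
    ring
  · rename_i h
    unfold binom_mod5_alt
    simp only []
    have hm : (if n > k then n else k) ≤ 0 := by split <;> omega
    rw [lenB_of_nonpos _ hm]
    simp
termination_by n.toNat + k.toNat
decreasing_by
  rw [PySem.Int.floordiv_eq_ediv_of_pos (by norm_num), PySem.Int.floordiv_eq_ediv_of_pos (by norm_num)]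
  omega

-- ===== VERDICT (by name: the statement is the Claim_ definition above) =====
theorem binom_mod5_spec : Claim_equal_binom_mod5 := by
  intro n k _
  unfold Spec_binom_mod5 binom_mod5
  rw [binomA_loop_eq]
  ring
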